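-- pv_equiv track=rewrite | github.com/pranshul2112/HackerRank | Algorithms/Implementation/Between Two Sets.py | abc
-- ===== SOURCE A (Python) =====
-- import math
--
-- def abc(arr, brr):
--     lcm_num = arr[0]
--     gcd_num = brr[0]
--     if len(arr) > 1:
--         for i in range(len(arr)):
--             lcm_num = (lcm_num * arr[i])//math.gcd(lcm_num, arr[i])
--     if len(brr) > 1:
--         for i in range(len(brr)):
--             gcd_num = math.gcd(gcd_num, brr[i])
--     flag = 0
--     for i in range(lcm_num, gcd_num + 1, lcm_num):
--         if math.gcd(gcd_num, i) == i:
--             flag += 1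
--     return flag
-- ===== SOURCE B (Python) =====
-- import math
--
-- def abc(arr, brr):
--     L = arr[0]
--     if len(arr) > 1:
--         for a in arr:
--             L = L * a // math.gcd(L, a)
--     G = brr[0]
--     for b in brr[1:]:
--         G = math.gcd(G, b)
--     if L <= 0 or G <= 0 or G % L != 0:
--         return 0
--     n = G // L
--     cnt = 0
--     for d in range(1, math.isqrt(n) + 1):
--         if n % d == 0:
--             cnt += 1 if d * d == n else 2
--     return cnt
-- ===== Notes on version B (the rewrite author's own statement) =====
-- stated objective: alternative
-- what changed: B keeps A's lcm/gcd reduction loops but replaces the counting loop: instead of stepping through every multiple of the lcm up to the gcd and testing each with a gcd call, B checks the sign/divisibility conditions once and counts the divisors of gcd//lcm by trial division up to its integer square root (O(sqrt(G/L)) versus O(G/L) counting steps; on random inputs the shared reduction loops dominate, so no overall speedup was measured).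
import Mathlib
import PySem

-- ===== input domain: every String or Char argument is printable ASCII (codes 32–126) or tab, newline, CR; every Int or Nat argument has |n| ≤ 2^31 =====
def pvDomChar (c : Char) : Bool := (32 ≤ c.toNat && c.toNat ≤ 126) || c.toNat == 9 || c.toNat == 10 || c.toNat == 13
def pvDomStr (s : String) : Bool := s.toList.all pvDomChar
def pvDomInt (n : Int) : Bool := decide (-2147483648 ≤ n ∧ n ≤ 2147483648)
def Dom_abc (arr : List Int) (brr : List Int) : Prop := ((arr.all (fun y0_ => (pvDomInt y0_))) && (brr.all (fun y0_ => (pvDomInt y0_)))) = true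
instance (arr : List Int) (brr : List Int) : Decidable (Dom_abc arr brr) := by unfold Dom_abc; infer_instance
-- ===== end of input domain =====

-- B replaces A's walk over every multiple of lcm(arr) up to gcd(brr) by divisor counting of gcd//lcm via trial division up to its square root (alternative counting algorithm; the shared reduction loops are unchanged).

-- ===== PORT A =====
-- the two loop bodies, shared verbatim by both Pythons' lcm/gcd reduction loops:
-- lcm_num = (lcm_num * a) // math.gcd(lcm_num, a)  and  gcd_num = math.gcd(gcd_num, b);
-- math.gcd is exactly (Int.gcd · · : Int) on all ints
def lcmStep (l a : Int) : Int := PySem.Int.floordiv (l * a) (Int.gcd l a)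
def gcdStep (g b : Int) : Int := (Int.gcd g b : Int)

-- arr[0]/brr[0] are pyGetD with default 0 (Pre_ keeps the lists nonempty, so the default is never read)
def abc (arr : List Int) (brr : List Int) : Int :=
  let lcm0 : Int := PySem.List.pyGetD arr 0 0
  let gcd0 : Int := PySem.List.pyGetD brr 0 0
  let lcm1 : Int :=
    if 1 < PySem.List.len arr then
      (PySem.List.pyRange 0 (PySem.List.len arr)).foldl
        (fun l i => lcmStep l (PySem.List.pyGetD arr i 0)) lcm0
    else lcm0
  let gcd1 : Int :=
    if 1 < PySem.List.len brr then
      (PySem.List.pyRange 0 (PySem.List.len brr)).foldl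
        (fun g i => gcdStep g (PySem.List.pyGetD brr i 0)) gcd0
    else gcd0
  (PySem.List.pyRange lcm1 (gcd1 + 1) lcm1).foldl
    (fun flag i => if (Int.gcd gcd1 i : Int) = i then flag + 1 else flag) 0

-- ===== PORT B =====
-- B keeps A's lcm/gcd reduction loops (lcmStep/gcdStep above, brr[1:] is List.drop 1, exact) and
-- replaces the counting loop: trial division up to math.isqrt(n) = Int.sqrt n (exact on the n ≥ 0 reached)
def abc_alt (arr : List Int) (brr : List Int) : Int :=
  let L0 : Int := PySem.List.pyGetD arr 0 0
  let L : Int :=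
    if 1 < PySem.List.len arr then
      (PySem.List.pyRange 0 (PySem.List.len arr)).foldl
        (fun l i => lcmStep l (PySem.List.pyGetD arr i 0)) L0
    else L0
  let G : Int := (brr.drop 1).foldl gcdStep (PySem.List.pyGetD brr 0 0)
  if L ≤ 0 ∨ G ≤ 0 ∨ PySem.Int.mod G L ≠ 0 then 0
  else
    let n : Int := PySem.Int.floordiv G L
    (PySem.List.pyRange 1 (Int.sqrt n + 1)).foldl
      (fun cnt d => if PySem.Int.mod n d = 0 then cnt + (if d * d = n then 1 else 2) else cnt) 0

-- ===== PRECONDITION & SPEC =====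
-- Pre_ is exactly where the Python A returns normally: A raises IndexError on an empty list and
-- ValueError/ZeroDivisionError (range step 0 / gcd 0) when arr contains 0, which forces its lcm chain to 0.
def Pre_abc (arr : List Int) (brr : List Int) : Prop :=
  arr ≠ [] ∧ brr ≠ [] ∧ (0 : Int) ∉ arr
instance (arr : List Int) (brr : List Int) : Decidable (Pre_abc arr brr) := by
  unfold Pre_abc; infer_instance
def pvWitness_abc : List Int × List Int := ([2, 6], [24, 36])

def Spec_abc (arr : List Int) (brr : List Int) (out : Int) : Prop := out = abc_alt arr brr
instance (arr : List Int) (brr : List Int) (out : Int) : Decidable (Spec_abc arr brr out) := by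
  unfold Spec_abc; infer_instance

-- ===== CLAIM (what is proved, stated in full; the proofs are below) =====
def Claim_equal_abc : Prop := ∀ (arr : List Int) (brr : List Int), Dom_abc arr brr → Pre_abc arr brr → Spec_abc arr brr (abc arr brr)

-- ===== LEMMAS AND PROOFS =====

theorem lcmStep_ne_zero {l a : Int} (hl : l ≠ 0) (ha : a ≠ 0) : lcmStep l a ≠ 0 := by
  have hg : 0 < (Int.gcd l a : Int) := by exact_mod_cast Int.gcd_pos_of_ne_zero_left a hl
  simp only [lcmStep, PySem.Int.floordiv_eq_ediv_of_pos hg]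
  rcases lt_trichotomy (l * a) 0 with hneg | hzero | hpos
  · have := Int.ediv_neg_of_neg_of_pos hneg hg
    omega
  · exact absurd hzero (mul_ne_zero hl ha)
  · have hdvd : (Int.gcd l a : Int) ∣ l * a := dvd_mul_of_dvd_left (Int.gcd_dvd_left l a) a
    have hle : (Int.gcd l a : Int) ≤ l * a := Int.le_of_dvd hpos hdvd
    have h1 : 1 ≤ l * a / (Int.gcd l a : Int) := (Int.le_ediv_iff_mul_le hg).mpr (by omega)
    omega

theorem foldl_lcmStep_ne_zero (t : List Int) (a : Int) (ha : a ≠ 0) (ht : ∀ x ∈ t, x ≠ 0) :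
    t.foldl lcmStep a ≠ 0 := by
  induction t generalizing a with
  | nil => exact ha
  | cons x xs ih =>
      exact ih _ (lcmStep_ne_zero ha (ht x (by simp))) (fun y hy => ht y (by simp [hy]))

-- gcd(G, i) == i  ⇔  i ∣ G, for i > 0
theorem gcd_eq_self_iff {G i : Int} (hi : 0 < i) : ((Int.gcd G i : Int) = i) ↔ i ∣ G := by
  constructor
  · intro h; rw [← h]; exact Int.gcd_dvd_left G i
  · intro h
    rw [Int.gcd_eq_natAbs_right h]
    exact Int.natAbs_of_nonneg hi.le

theorem sum_map_range_int (M : ℕ) (h : ℕ → Int) :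
    ((List.range M).map h).sum = ∑ k ∈ Finset.range M, h k := by
  induction M with
  | zero => simp
  | succ m ih => simp [List.range_succ, Finset.sum_range_succ, ih]

theorem countP_range_eq_sum (M : ℕ) (p : ℕ → Bool) :
    ((List.range M).countP p : ℕ) = ∑ k ∈ Finset.range M, (if p k then 1 else 0) := by
  induction M with
  | zero => simp
  | succ m ih =>
      rw [List.range_succ, List.countP_append, Finset.sum_range_succ, ← ih]
      simp [List.countP_cons]

-- ℕ-side: number of divisors counted one by one
theorem natA (N : ℕ) (_hN : N ≠ 0) :
    (List.range N).countP (fun k => decide ((k + 1) ∣ N)) = N.divisors.card := by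
  rw [countP_range_eq_sum]
  have h2 : N.divisors.card = ∑ d ∈ Finset.Ico 1 (N + 1), if d ∣ N then 1 else 0 := by
    rw [show N.divisors = Finset.filter (· ∣ N) (Finset.Ico 1 (N + 1)) from rfl,
      Finset.card_filter]
  rw [h2, Finset.sum_Ico_eq_sum_range]
  simp only [Nat.add_sub_cancel, decide_eq_true_eq]
  exact Finset.sum_congr rfl (fun k _ => by rw [Nat.add_comm 1 k])

-- ℕ-side: number of divisors counted by trial division up to √N
theorem natB (N : ℕ) (hN : N ≠ 0) :
    (∑ k ∈ Finset.range (Nat.sqrt N),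
      (if (k + 1) ∣ N then (if (k + 1) * (k + 1) = N then 1 else 2) else 0)) = N.divisors.card := by
  have hstep1 : (∑ k ∈ Finset.range (Nat.sqrt N),
      (if (k + 1) ∣ N then (if (k + 1) * (k + 1) = N then 1 else 2) else 0))
      = ∑ d ∈ Finset.Ico 1 (Nat.sqrt N + 1), (if d ∣ N then (if d * d = N then 1 else 2) else 0) := by
    rw [Finset.sum_Ico_eq_sum_range]
    simp only [Nat.add_sub_cancel]
    exact (Finset.sum_congr rfl (fun k _ => by rw [Nat.add_comm 1 k])).symm
  rw [hstep1, ← Finset.sum_filter]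
  have hsmall : (Finset.Ico 1 (Nat.sqrt N + 1)).filter (· ∣ N)
      = N.divisors.filter (fun d => d * d ≤ N) := by
    ext d
    simp only [Finset.mem_filter, Finset.mem_Ico, Nat.mem_divisors, hN, and_true, ne_eq,
      not_false_iff]
    constructor
    · rintro ⟨⟨h1, h2⟩, hd⟩
      exact ⟨hd, Nat.le_sqrt.mp (by omega)⟩
    · rintro ⟨hd, hle⟩
      have hd0 : d ≠ 0 := by rintro rfl; exact hN (Nat.eq_zero_of_zero_dvd hd)
      have := Nat.le_sqrt.mpr hle
      exact ⟨⟨by omega, by omega⟩, hd⟩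
  rw [hsmall]
  have hsplit : ∀ d ∈ N.divisors.filter (fun d => d * d ≤ N),
      (if d * d = N then 1 else 2) = 1 + (if ¬ d * d = N then 1 else 0) := by
    intro d _; split_ifs <;> simp_all
  rw [Finset.sum_congr rfl hsplit, Finset.sum_add_distrib, Finset.sum_const, smul_eq_mul,
    mul_one, ← Finset.card_filter, Finset.filter_filter]
  have hstrict : (N.divisors.filter fun d => d * d ≤ N ∧ ¬ d * d = N)
      = N.divisors.filter (fun d => d * d < N) := by
    apply Finset.filter_congr; intro d _; constructor <;> intro h <;> omega
  have hpair : (N.divisors.filter (fun d => d * d < N)).card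
      = (N.divisors.filter (fun d => ¬ d * d ≤ N)).card := by
    apply Finset.card_nbij' (fun d => N / d) (fun d => N / d)
    · rintro d hd
      simp only [Finset.coe_filter, Set.mem_setOf_eq, Nat.mem_divisors, hN, ne_eq,
        not_false_iff, and_true] at hd ⊢
      obtain ⟨hdvd, hlt⟩ := hd
      have he : d * (N / d) = N := Nat.mul_div_cancel' hdvd
      refine ⟨Nat.div_dvd_of_dvd hdvd, ?_⟩
      have hde : d < N / d := Nat.lt_of_mul_lt_mul_left (a := d) (by omega)
      have _h2 : d * (N / d) < (N / d) * (N / d) :=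
        (Nat.mul_lt_mul_right (by omega)).mpr hde
      omega
    · rintro d hd
      simp only [Finset.coe_filter, Set.mem_setOf_eq, Nat.mem_divisors, hN, ne_eq,
        not_false_iff, and_true] at hd ⊢
      obtain ⟨hdvd, hgt⟩ := hd
      have he : d * (N / d) = N := Nat.mul_div_cancel' hdvd
      refine ⟨Nat.div_dvd_of_dvd hdvd, ?_⟩
      have he0 : N / d ≠ 0 := by intro h0; rw [h0] at he; omega
      have hed : N / d < d := by
        by_contra hc
        have h3 : d * d ≤ d * (N / d) := Nat.mul_le_mul_left d (by omega)
        omega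
      have h4 : (N / d) * (N / d) < d * (N / d) :=
        (Nat.mul_lt_mul_right (Nat.pos_of_ne_zero he0)).mpr hed
      omega
    · rintro d hd
      simp only [Finset.coe_filter, Set.mem_setOf_eq, Nat.mem_divisors, hN, ne_eq,
        not_false_iff, and_true] at hd
      exact Nat.div_div_self hd.1 hN
    · rintro d hd
      simp only [Finset.coe_filter, Set.mem_setOf_eq, Nat.mem_divisors, hN, ne_eq,
        not_false_iff, and_true] at hd
      exact Nat.div_div_self hd.1 hN
  rw [hstrict, hpair]
  exact Finset.card_filter_add_card_filter_not (s := N.divisors) (fun d => d * d ≤ N)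

theorem sum_filter_map (l : List ℕ) (p : ℕ → Bool) (w : ℕ → Int) :
    ((l.filter p).map w).sum = (l.map (fun x => if p x then w x else 0)).sum := by
  induction l with
  | nil => simp
  | cons x xs ih =>
      by_cases h : p x <;> simp [h, ih]

-- the core: A's multiple-walking count equals B's √-trial count, for any positive L, G
theorem core (L G : Int) (hL : 0 < L) (hG : 0 < G) :
    (PySem.List.pyRange L (G + 1) L).foldl
      (fun flag i => if (Int.gcd G i : Int) = i then flag + 1 else flag) (0 : Int)
    = (if PySem.Int.mod G L ≠ 0 then (0 : Int) else
        (PySem.List.pyRange 1 (Int.sqrt (PySem.Int.floordiv G L) + 1)).foldl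
          (fun cnt d => if PySem.Int.mod (PySem.Int.floordiv G L) d = 0 then
              cnt + (if d * d = PySem.Int.floordiv G L then 1 else 2) else cnt) (0 : Int)) := by
  have hL0 : L ≠ 0 := by omega
  rw [PySem.List.foldl_ite_add_one (fun i => (Int.gcd G i : Int) = i) (PySem.List.pyRange L (G + 1) L) 0]
  rw [PySem.Int.mod_eq_emod_of_pos hL, PySem.Int.floordiv_eq_ediv_of_pos hL]
  rw [PySem.List.pyRange_of_pos L (G + 1) hL, List.countP_map]
  have hm : (if L < G + 1 then ((G + 1 - L + L - 1) / L).toNat else 0) = (G / L).toNat := by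
    split_ifs with h
    · congr 1; ring_nf
    · have h1 : G < L := by omega
      have h2 : G / L = 0 := Int.ediv_eq_zero_of_lt hG.le h1
      omega
  rw [hm]
  by_cases hdvd : L ∣ G
  · -- L divides G: both sides count the divisors of N = G / L
    have hmodz : G % L = 0 := Int.emod_eq_zero_of_dvd hdvd
    have hc' : L * (G / L) = G := Int.mul_ediv_cancel' hdvd
    have hn1 : 1 ≤ G / L := by
      by_contra hcon
      have h3 : G / L ≤ 0 := by omega
      nlinarith
    set N : ℕ := (G / L).toNat with hNdef
    have hNcast : (N : Int) = G / L := Int.toNat_of_nonneg (by omega)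
    have hN0 : N ≠ 0 := by omega
    have hA : (List.range N).countP
        ((fun i => decide ((Int.gcd G i : Int) = i)) ∘ fun k : ℕ => L + L * (k : Int))
        = N.divisors.card := by
      rw [List.countP_congr (q := fun k : ℕ => decide ((k + 1) ∣ N)) ?_]
      · exact natA N hN0
      · intro k _
        simp only [Function.comp_apply, decide_eq_true_eq]
        have hfac : L + L * (k : Int) = L * ((k : Int) + 1) := by ring
        have hi : 0 < L + L * (k : Int) := by
          rw [hfac]; positivity
        rw [gcd_eq_self_iff hi, hfac, ← hc', mul_dvd_mul_iff_left hL0, ← hNcast]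
        constructor
        · intro h; exact_mod_cast h
        · intro h; exact_mod_cast h
    rw [hA]
    simp only [hmodz, ne_eq, not_true_eq_false, if_false]
    -- B side
    have hsqrt : Int.sqrt (G / L) = (Nat.sqrt N : Int) := by
      rw [← hNcast]; rfl
    set M : ℕ := Nat.sqrt N with hMdef
    rw [hsqrt, PySem.List.pyRange_one 1 ((M : Int) + 1)]
    have hMt : ((M : Int) + 1 - 1).toNat = M := by omega
    rw [hMt,
      PySem.List.foldl_ite_eq_foldl_filter (p := fun d => PySem.Int.mod (G / L) d = 0)
        (f := fun cnt d => cnt + (if d * d = G / L then 1 else 2)),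
      PySem.List.foldl_add, List.filter_map, List.map_map, sum_filter_map,
      sum_map_range_int]
    congr 1
    rw [← natB N hN0]
    push_cast
    refine Finset.sum_congr rfl (fun k _ => ?_)
    simp only [Function.comp_apply, decide_eq_true_eq, PySem.Int.mod_eq_zero_iff_dvd]
    rw [add_comm (1 : Int) (k : Int)]
    have e1 : ((k : Int) + 1) ∣ G / L ↔ (k + 1) ∣ N := by
      rw [← hNcast]
      constructor
      · intro h; exact_mod_cast h
      · intro h; exact_mod_cast h
    have e2 : ((k : Int) + 1) * ((k : Int) + 1) = G / L ↔ (k + 1) * (k + 1) = N := by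
      rw [← hNcast]
      constructor
      · intro h; exact_mod_cast h
      · intro h; exact_mod_cast h
    split_ifs <;> simp_all
  · -- L does not divide G: both sides are 0
    have hmodnz : G % L ≠ 0 := fun h => hdvd (Int.dvd_of_emod_eq_zero h)
    simp only [hmodnz, ne_eq, not_false_iff, if_true]
    have hzero : (List.range (G / L).toNat).countP
        ((fun i => decide ((Int.gcd G i : Int) = i)) ∘ fun k : ℕ => L + L * (k : Int)) = 0 := by
      rw [List.countP_eq_zero]
      intro k _
      simp only [Function.comp_apply, decide_eq_true_eq]
      intro hcond
      have hfac : L + L * (k : Int) = L * ((k : Int) + 1) := by ring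
      have hi : 0 < L + L * (k : Int) := by rw [hfac]; positivity
      rw [gcd_eq_self_iff hi, hfac] at hcond
      exact hdvd (dvd_trans (Dvd.intro _ rfl) hcond)
    rw [hzero]
    rfl

theorem gcdStep_absorb (b y : Int) : gcdStep (gcdStep b b) y = gcdStep b y := by
  simp [gcdStep, Int.gcd, Int.natAbs_abs]

theorem pyGetD_head (a0 : Int) (t : List Int) : PySem.List.pyGetD (a0 :: t) (0 : Int) 0 = a0 := by
  simp [PySem.List.pyGetD, PySem.List.pyGet?, PySem.List.pyIdx?]

-- A's gcd loop (over all of brr, guarded by len > 1) computes the same value as B's fold over brr[1:]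
theorem gcd_if_eq (b0 : Int) (u : List Int) :
    (if (1 : Int) < PySem.List.len (b0 :: u) then (b0 :: u).foldl gcdStep b0 else b0)
    = u.foldl gcdStep b0 := by
  cases u with
  | nil => simp [PySem.List.len_eq]
  | cons y ys =>
      rw [if_pos]
      · simp only [List.foldl_cons, gcdStep_absorb]
      · rw [PySem.List.len_eq]
        simp only [List.length_cons]
        push_cast
        omega

-- the full counting equivalence, for every nonzero L and arbitrary G
theorem core2 (L G : Int) (hL : L ≠ 0) :
    (PySem.List.pyRange L (G + 1) L).foldl
      (fun flag i => if (Int.gcd G i : Int) = i then flag + 1 else flag) (0 : Int)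
    = (if L ≤ 0 ∨ G ≤ 0 ∨ PySem.Int.mod G L ≠ 0 then (0 : Int) else
        (PySem.List.pyRange 1 (Int.sqrt (PySem.Int.floordiv G L) + 1)).foldl
          (fun cnt d => if PySem.Int.mod (PySem.Int.floordiv G L) d = 0 then
              cnt + (if d * d = PySem.Int.floordiv G L then 1 else 2) else cnt) (0 : Int)) := by
  rcases lt_or_gt_of_ne hL with hneg | hpos
  · -- L < 0: every i produced by the countdown range is ≤ L < 0, gcd(G, i) ≥ 0 never equals i
    rw [if_pos (Or.inl hneg.le),
      PySem.List.foldl_ite_add_one (fun i => (Int.gcd G i : Int) = i) (PySem.List.pyRange L (G + 1) L) 0]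
    have hz : (PySem.List.pyRange L (G + 1) L).countP (fun i => decide ((Int.gcd G i : Int) = i)) = 0 := by
      rw [List.countP_eq_zero]
      intro i hi
      obtain ⟨_, hile, _⟩ := (PySem.List.mem_pyRange_iff_of_neg hneg i).mp hi
      simp only [decide_eq_true_eq]
      intro heq
      have : (0 : Int) ≤ (Int.gcd G i : Int) := Int.natCast_nonneg _
      omega
    rw [hz]
    rfl
  · by_cases hG : 0 < G
    · rw [core L G hpos hG]
      have hiff : (L ≤ 0 ∨ G ≤ 0 ∨ PySem.Int.mod G L ≠ 0) ↔ PySem.Int.mod G L ≠ 0 := by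
        constructor
        · rintro (h | h | h)
          · omega
          · omega
          · exact h
        · exact fun h => Or.inr (Or.inr h)
      rw [if_congr hiff rfl rfl]
    · -- 0 < L, G ≤ 0: the ascending range from L up to G + 1 ≤ 1 is empty of members
      rw [if_pos (Or.inr (Or.inl (by omega))),
        PySem.List.foldl_ite_add_one (fun i => (Int.gcd G i : Int) = i) (PySem.List.pyRange L (G + 1) L) 0]
      have hz : (PySem.List.pyRange L (G + 1) L).countP (fun i => decide ((Int.gcd G i : Int) = i)) = 0 := by
        rw [List.countP_eq_zero]
        intro i hi
        obtain ⟨h1, h2, _⟩ := (PySem.List.mem_pyRange_iff_of_pos hpos i).mp hi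
        omega
      rw [hz]
      rfl

theorem abc_unfold (a0 b0 : Int) (t u : List Int) :
    abc (a0 :: t) (b0 :: u)
    = (PySem.List.pyRange
        (if (1 : Int) < PySem.List.len (a0 :: t) then (a0 :: t).foldl lcmStep a0 else a0)
        (u.foldl gcdStep b0 + 1)
        (if (1 : Int) < PySem.List.len (a0 :: t) then (a0 :: t).foldl lcmStep a0 else a0)).foldl
        (fun flag i => if (Int.gcd (u.foldl gcdStep b0) i : Int) = i then flag + 1 else flag) (0 : Int) := by
  simp only [abc, pyGetD_head]
  rw [PySem.List.foldl_pyRange_zero_pyGetD (a0 :: t) 0 lcmStep a0,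
    PySem.List.foldl_pyRange_zero_pyGetD (b0 :: u) 0 gcdStep b0, gcd_if_eq b0 u]

theorem abc_alt_unfold (a0 b0 : Int) (t u : List Int) :
    abc_alt (a0 :: t) (b0 :: u)
    = (if (if (1 : Int) < PySem.List.len (a0 :: t) then (a0 :: t).foldl lcmStep a0 else a0) ≤ 0
          ∨ u.foldl gcdStep b0 ≤ 0
          ∨ PySem.Int.mod (u.foldl gcdStep b0)
              (if (1 : Int) < PySem.List.len (a0 :: t) then (a0 :: t).foldl lcmStep a0 else a0) ≠ 0
       then (0 : Int) else
        (PySem.List.pyRange 1 (Int.sqrt (PySem.Int.floordiv (u.foldl gcdStep b0)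
            (if (1 : Int) < PySem.List.len (a0 :: t) then (a0 :: t).foldl lcmStep a0 else a0)) + 1)).foldl
          (fun cnt d => if PySem.Int.mod (PySem.Int.floordiv (u.foldl gcdStep b0)
              (if (1 : Int) < PySem.List.len (a0 :: t) then (a0 :: t).foldl lcmStep a0 else a0)) d = 0 then
              cnt + (if d * d = PySem.Int.floordiv (u.foldl gcdStep b0)
                (if (1 : Int) < PySem.List.len (a0 :: t) then (a0 :: t).foldl lcmStep a0 else a0) then 1 else 2)
              else cnt) (0 : Int)) := by
  simp only [abc_alt, pyGetD_head, List.drop_succ_cons, List.drop_zero]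
  rw [PySem.List.foldl_pyRange_zero_pyGetD (a0 :: t) 0 lcmStep a0]

-- ===== VERDICT (by name: the statement is the Claim_ definition above) =====
theorem abc_spec : Claim_equal_abc := by
  intro arr brr _hdom hpre
  obtain ⟨ha, hb, hnz⟩ := hpre
  obtain ⟨a0, t, rfl⟩ := List.exists_cons_of_ne_nil ha
  obtain ⟨b0, u, rfl⟩ := List.exists_cons_of_ne_nil hb
  have hLne : (if (1 : Int) < PySem.List.len (a0 :: t) then (a0 :: t).foldl lcmStep a0 else a0) ≠ 0 := by
    split_ifs with h
    · exact foldl_lcmStep_ne_zero (a0 :: t) a0 (fun h0 => hnz (h0 ▸ List.mem_cons_self))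
        (fun x hx h0 => hnz (h0 ▸ hx))
    · exact fun h0 => hnz (h0 ▸ List.mem_cons_self)
  unfold Spec_abc
  rw [abc_unfold a0 b0 t u, abc_alt_unfold a0 b0 t u]
  exact core2 _ (u.foldl gcdStep b0) hLne
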